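-- pv_equiv track=rewrite | github.com/vobbilis/mytsdb | scripts/update_test_status.py | update_test_status
-- ===== SOURCE A (Python) =====
-- from typing import Dict, List, Tuple
--
-- def parse_test_plan(content: str) -> List[Tuple[str, str, int]]:
--     """Parse test plan and return list of (section, test, line_number)."""
--     tests = []
--     current_section = ''
--     for i, line in enumerate(content.splitlines()):
--         if line.startswith('###'):
--             current_section = line.strip('# ')
--         elif line.strip().startswith('- ['):
--             test = line.split(']', 1)[1].strip()
--             tests.append((current_section, test, i))
--     return tests
--
-- def update_test_status(content: str, updates: Dict[Tuple[str, str], str]) -> str: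
--     """Update test status in content based on updates dict."""
--     lines = content.splitlines()
--     tests = parse_test_plan(content)
--
--     for section, test, line_num in tests:
--         if (section, test) in updates:
--             new_status = updates[(section, test)]
--             lines[line_num] = f'- {new_status}{test}'
--
--     return '\n'.join(lines)
-- ===== SOURCE B (Python) =====
-- def update_test_status(content, updates):
--     """Update test status in content based on updates dict (single streaming pass)."""
--     current_section = ''
--     out = []
--     for line in content.splitlines():
--         if line.startswith('###'):
--             current_section = line.strip('# ')
--             out.append(line)
--         elif line.strip().startswith('- ['):
--             test = line.split(']', 1)[1].strip()
--             status = updates.get((current_section, test))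
--             out.append(line if status is None else f'- {status}{test}')
--         else:
--             out.append(line)
--     return '\n'.join(out)
-- ===== Notes on version B (the rewrite author's own statement) =====
-- stated objective: simpler
-- what changed: Replaces A's two-pass strategy (build a (section,test,line_number) index with parse_test_plan, then patch lines by index) with a single streaming pass over the lines that tracks the current section and emits each output line directly, so the intermediate index structure and the in-place list mutation disappear.
import Mathlib
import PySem

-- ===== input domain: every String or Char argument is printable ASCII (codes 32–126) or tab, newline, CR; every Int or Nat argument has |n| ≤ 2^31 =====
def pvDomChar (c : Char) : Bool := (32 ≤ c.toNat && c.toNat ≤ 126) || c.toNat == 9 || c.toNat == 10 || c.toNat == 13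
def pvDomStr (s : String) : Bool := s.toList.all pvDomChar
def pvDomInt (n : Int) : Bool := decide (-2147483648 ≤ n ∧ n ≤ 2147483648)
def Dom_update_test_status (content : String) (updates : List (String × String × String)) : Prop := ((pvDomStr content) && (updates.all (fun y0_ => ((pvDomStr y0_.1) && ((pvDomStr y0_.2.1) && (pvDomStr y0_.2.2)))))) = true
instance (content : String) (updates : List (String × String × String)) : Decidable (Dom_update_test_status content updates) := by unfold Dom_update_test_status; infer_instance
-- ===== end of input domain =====

-- B replaces A's two passes (index the tests, then patch lines by line number) with one
-- streaming pass over the lines; return values proved equal under Pre_ (no side effects involved).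

-- ===== PORT A =====

-- dict lookup `updates[(section, test)]` / `(section, test) in updates` on the association list
def pvLookup (updates : List (String × String × String)) (sec test : String) : Option String :=
  (updates.find? (fun p => p.1 == sec && p.2.1 == test)).map (·.2.2)

-- `line.split(']', 1)[1].strip()` ([1] defaulted to ""; Python raises IndexError exactly where
-- the default is used — those inputs are excluded by Pre_)
def pvExtract (line : String) : String :=
  PySem.Str.strip ((PySem.List.pyGet? ((PySem.Str.splitMax? line "]" 1).getD []) 1).getD "")

-- parse_test_plan's loop: enumerate(content.splitlines()) with current_section state
def parse_test_plan_aux : List String → Nat → String → List (String × String × Nat)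
  | [], _, _ => []
  | l :: rest, i, sec =>
    if PySem.Str.startswith l "###" then
      parse_test_plan_aux rest (i + 1) (PySem.Str.stripChars l "# ")
    else if PySem.Str.startswith (PySem.Str.strip l) "- [" then
      (sec, pvExtract l, i) :: parse_test_plan_aux rest (i + 1) sec
    else
      parse_test_plan_aux rest (i + 1) sec

def update_test_status (content : String) (updates : List (String × String × String)) : String :=
  let lines := PySem.Str.splitlines content
  let tests := parse_test_plan_aux lines 0 ""
  let lines' := tests.foldl (fun ls t =>
    match pvLookup updates t.1 t.2.1 with
    | some newStatus => ls.set t.2.2 ("- " ++ newStatus ++ t.2.1)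
    | none => ls) lines
  PySem.Str.join "\n" lines'

-- ===== PORT B =====

-- B's single loop over content.splitlines(), carrying current_section, building the output list
def pvStream (updates : List (String × String × String)) : List String → String → List String
  | [], _ => []
  | l :: rest, sec =>
    if PySem.Str.startswith l "###" then
      l :: pvStream updates rest (PySem.Str.stripChars l "# ")
    else if PySem.Str.startswith (PySem.Str.strip l) "- [" then
      (match pvLookup updates sec (pvExtract l) with
       | none => l
       | some st => "- " ++ st ++ pvExtract l) :: pvStream updates rest sec
    else
      l :: pvStream updates rest sec

def update_test_status_alt (content : String) (updates : List (String × String × String)) : String :=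
  PySem.Str.join "\n" (pvStream updates (PySem.Str.splitlines content) "")

-- ===== PRECONDITION & SPEC =====
-- Pre_ excludes inputs with a line whose stripped form starts with '- [' but contains no ']':
-- there Python A raises IndexError at line.split(']', 1)[1] (B raises the same way).
def Pre_update_test_status (content : String) (updates : List (String × String × String)) : Prop :=
  ∀ l ∈ PySem.Str.splitlines content,
    PySem.Str.startswith l "###" = false →
    PySem.Str.startswith (PySem.Str.strip l) "- [" = true →
    PySem.Str.isIn "]" l = true
instance (content : String) (updates : List (String × String × String)) : Decidable (Pre_update_test_status content updates) := by unfold Pre_update_test_status; infer_instance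

def pvWitness_update_test_status : String × (List (String × String × String)) :=
  ("### Core\n- [ ] insert works\ntext", [("Core", "insert works", "[x] ")])

def Spec_update_test_status (content : String) (updates : List (String × String × String)) (out : String) : Prop := out = update_test_status_alt content updates
instance (content : String) (updates : List (String × String × String)) (out : String) : Decidable (Spec_update_test_status content updates out) := by unfold Spec_update_test_status; infer_instance

-- ===== CLAIM (what is proved, stated in full; the proofs are below) =====
def Claim_equal_update_test_status : Prop := ∀ (content : String) (updates : List (String × String × String)), Dom_update_test_status content updates → Pre_update_test_status content updates → Spec_update_test_status content updates (update_test_status content updates)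

-- ===== LEMMAS AND PROOFS =====

-- shorthand for A's patching fold (proof-side only)
def pvPatch (updates : List (String × String × String))
    (ts : List (String × String × Nat)) (ls : List String) : List String :=
  ts.foldl (fun ls t =>
    match pvLookup updates t.1 t.2.1 with
    | some newStatus => ls.set t.2.2 ("- " ++ newStatus ++ t.2.1)
    | none => ls) ls

theorem parse_aux_shift (ls : List String) (i : Nat) (sec : String) :
    parse_test_plan_aux ls (i + 1) sec
      = (parse_test_plan_aux ls i sec).map (fun t => (t.1, t.2.1, t.2.2 + 1)) := by
  induction ls generalizing i sec with
  | nil => simp [parse_test_plan_aux]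
  | cons l rest ih =>
    simp only [parse_test_plan_aux]
    split_ifs <;> simp [ih]

theorem pvPatch_shift (updates : List (String × String × String))
    (ts : List (String × String × Nat)) (l : String) (ls : List String) :
    pvPatch updates (ts.map (fun t => (t.1, t.2.1, t.2.2 + 1))) (l :: ls)
      = l :: pvPatch updates ts ls := by
  induction ts generalizing ls with
  | nil => simp [pvPatch]
  | cons t ts ih =>
    simp only [pvPatch, List.map_cons, List.foldl_cons] at *
    cases pvLookup updates t.1 t.2.1 <;> simp [ih, List.set]

theorem pvPatch_eq_stream (updates : List (String × String × String))
    (ls : List String) (sec : String) :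
    pvPatch updates (parse_test_plan_aux ls 0 sec) ls = pvStream updates ls sec := by
  induction ls generalizing sec with
  | nil => simp [pvPatch, parse_test_plan_aux, pvStream]
  | cons l rest ih =>
    simp only [parse_test_plan_aux, pvStream]
    split_ifs with h1 h2
    · rw [parse_aux_shift, pvPatch_shift, ih]
    · simp only [pvPatch, List.foldl_cons]
      cases hlk : pvLookup updates sec (pvExtract l) <;>
        simp only [List.set] <;>
        rw [show ∀ x, (List.foldl (fun ls t =>
              match pvLookup updates t.1 t.2.1 with
              | some newStatus => ls.set t.2.2 ("- " ++ newStatus ++ t.2.1)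
              | none => ls) x (parse_test_plan_aux rest 1 sec)) = pvPatch updates (parse_test_plan_aux rest 1 sec) x from fun _ => rfl,
            parse_aux_shift, pvPatch_shift, ih]
    · rw [parse_aux_shift, pvPatch_shift, ih]

-- ===== VERDICT (by name: the statement is the Claim_ definition above) =====
theorem update_test_status_spec : Claim_equal_update_test_status := by
  intro content updates _ _
  show update_test_status content updates = _
  show PySem.Str.join "\n" (pvPatch updates (parse_test_plan_aux (PySem.Str.splitlines content) 0 "") (PySem.Str.splitlines content)) = _
  exact congrArg _ (pvPatch_eq_stream updates (PySem.Str.splitlines content) "")
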